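-- pv_equiv track=rewrite | github.com/JagaTheGhost/auto-readme-generator | backend/prompts.py | _infer_tech_stack
-- ===== SOURCE A (Python) =====
-- def _infer_tech_stack(tech_stack_items: list) -> str:
--     """Infer tech stack from selected items."""
--     if tech_stack_items is None:
--         tech_stack_items = []
--
--     frontend_techs = [t for t in tech_stack_items if t in
--         ["React", "Next.js", "Vue", "Angular", "Svelte", "Remix", "TypeScript", "Tailwind CSS", "Vite", "Webpack"]]
--     backend_techs = [t for t in tech_stack_items if t in
--         ["Node.js", "FastAPI", "Flask", "Django", "Go", "Rust", "Java/Spring", ".NET/C#", "Python", "PHP/Laravel"]]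
--     database_techs = [t for t in tech_stack_items if t in
--         ["MongoDB", "MySQL", "PostgreSQL", "SQLite", "Redis", "DynamoDB", "Firestore", "Elasticsearch"]]
--     devops_techs = [t for t in tech_stack_items if t in
--         ["Docker", "Kubernetes", "AWS", "Google Cloud", "Azure", "Vercel", "Netlify", "Heroku", "GitHub Actions", "Jenkins"]]
--     testing_techs = [t for t in tech_stack_items if t in
--         ["Jest", "Pytest", "Cypress", "Postman"]]
--
--     tech_stack_str = ""
--
--     if frontend_techs:
--         tech_stack_str += f"**Frontend:**\n{' • '.join(frontend_techs)}\n\n"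
--     if backend_techs:
--         tech_stack_str += f"**Backend:**\n{' • '.join(backend_techs)}\n\n"
--     if database_techs:
--         tech_stack_str += f"**Database:**\n{' • '.join(database_techs)}\n\n"
--     if devops_techs:
--         tech_stack_str += f"**DevOps & Deployment:**\n{' • '.join(devops_techs)}\n\n"
--     if testing_techs:
--         tech_stack_str += f"**Testing:**\n{' • '.join(testing_techs)}\n"
--
--     if not tech_stack_str:
--         tech_stack_str = """**Frontend:**
-- React • Next.js • TypeScript • Tailwind CSS
--
-- **Backend:**
-- Node.js • FastAPI • Python
--
-- **Database:**
-- PostgreSQL • Redis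
--
-- **DevOps:**
-- Docker • GitHub Actions"""
--
--     return tech_stack_str.strip()
-- ===== SOURCE B (Python) =====
-- _CATS = [
--     ("**Frontend:**", ["React", "Next.js", "Vue", "Angular", "Svelte", "Remix", "TypeScript", "Tailwind CSS", "Vite", "Webpack"]),
--     ("**Backend:**", ["Node.js", "FastAPI", "Flask", "Django", "Go", "Rust", "Java/Spring", ".NET/C#", "Python", "PHP/Laravel"]),
--     ("**Database:**", ["MongoDB", "MySQL", "PostgreSQL", "SQLite", "Redis", "DynamoDB", "Firestore", "Elasticsearch"]),
--     ("**DevOps & Deployment:**", ["Docker", "Kubernetes", "AWS", "Google Cloud", "Azure", "Vercel", "Netlify", "Heroku", "GitHub Actions", "Jenkins"]),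
--     ("**Testing:**", ["Jest", "Pytest", "Cypress", "Postman"]),
-- ]
--
-- _IDX = {t: i for i, (_, ts) in enumerate(_CATS) for t in ts}
--
-- _DEFAULT = """**Frontend:**
-- React • Next.js • TypeScript • Tailwind CSS
--
-- **Backend:**
-- Node.js • FastAPI • Python
--
-- **Database:**
-- PostgreSQL • Redis
--
-- **DevOps:**
-- Docker • GitHub Actions"""
--
--
-- def _infer_tech_stack(tech_stack_items: list) -> str:
--     """Infer tech stack from selected items (single pass over the items)."""
--     buckets = ([], [], [], [], [])
--     for t in tech_stack_items or []:
--         i = _IDX.get(t)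
--         if i is not None:
--             buckets[i].append(t)
--     parts = [h + "\n" + " • ".join(b) for (h, _), b in zip(_CATS, buckets) if b]
--     return "\n\n".join(parts) if parts else _DEFAULT
-- ===== Notes on version B (the rewrite author's own statement) =====
-- stated objective: simpler
-- what changed: A filters the whole input list five times (one whole-list membership scan per category) and concatenates conditional f-string blocks whose trailing separators strip() must clean up; B builds one tech-to-category index dict and makes a single pass over the items bucketing each one, then joins the non-empty sections with '\n\n' so no strip is needed.
import Mathlib
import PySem

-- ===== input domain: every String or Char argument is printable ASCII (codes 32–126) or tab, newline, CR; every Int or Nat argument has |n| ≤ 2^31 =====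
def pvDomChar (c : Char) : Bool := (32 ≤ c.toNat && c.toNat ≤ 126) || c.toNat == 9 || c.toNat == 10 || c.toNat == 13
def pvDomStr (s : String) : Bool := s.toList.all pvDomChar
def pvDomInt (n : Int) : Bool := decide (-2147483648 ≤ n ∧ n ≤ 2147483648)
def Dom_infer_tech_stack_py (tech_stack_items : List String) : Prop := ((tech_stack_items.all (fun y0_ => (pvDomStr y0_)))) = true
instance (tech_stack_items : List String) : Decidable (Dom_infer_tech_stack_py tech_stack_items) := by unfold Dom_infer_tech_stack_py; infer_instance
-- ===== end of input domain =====

-- B replaces A's five whole-list membership filters by one tech→category index consulted once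
-- per item in a single pass (objective: simpler single-pass bucketing; identical return value).

-- ===== PORT A =====
def catsF : List String := ["React", "Next.js", "Vue", "Angular", "Svelte", "Remix", "TypeScript", "Tailwind CSS", "Vite", "Webpack"]
def catsB : List String := ["Node.js", "FastAPI", "Flask", "Django", "Go", "Rust", "Java/Spring", ".NET/C#", "Python", "PHP/Laravel"]
def catsD : List String := ["MongoDB", "MySQL", "PostgreSQL", "SQLite", "Redis", "DynamoDB", "Firestore", "Elasticsearch"]
def catsO : List String := ["Docker", "Kubernetes", "AWS", "Google Cloud", "Azure", "Vercel", "Netlify", "Heroku", "GitHub Actions", "Jenkins"]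
def catsT : List String := ["Jest", "Pytest", "Cypress", "Postman"]

def defaultBlock : String := "**Frontend:**\nReact • Next.js • TypeScript • Tailwind CSS\n\n**Backend:**\nNode.js • FastAPI • Python\n\n**Database:**\nPostgreSQL • Redis\n\n**DevOps:**\nDocker • GitHub Actions"

def infer_tech_stack_py (tech_stack_items : List String) : String :=
  let frontend := tech_stack_items.filter (fun t => catsF.contains t)
  let backend := tech_stack_items.filter (fun t => catsB.contains t)
  let database := tech_stack_items.filter (fun t => catsD.contains t)
  let devops := tech_stack_items.filter (fun t => catsO.contains t)
  let testing := tech_stack_items.filter (fun t => catsT.contains t)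
  let s := ""
  let s := if ¬ frontend.isEmpty then s ++ "**Frontend:**\n" ++ PySem.Str.join " • " frontend ++ "\n\n" else s
  let s := if ¬ backend.isEmpty then s ++ "**Backend:**\n" ++ PySem.Str.join " • " backend ++ "\n\n" else s
  let s := if ¬ database.isEmpty then s ++ "**Database:**\n" ++ PySem.Str.join " • " database ++ "\n\n" else s
  let s := if ¬ devops.isEmpty then s ++ "**DevOps & Deployment:**\n" ++ PySem.Str.join " • " devops ++ "\n\n" else s
  let s := if ¬ testing.isEmpty then s ++ "**Testing:**\n" ++ PySem.Str.join " • " testing ++ "\n" else s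
  let s := if s = "" then defaultBlock else s
  PySem.Str.strip s

-- ===== PORT B =====
def altCats : List (String × List String) :=
  [("**Frontend:**", ["React", "Next.js", "Vue", "Angular", "Svelte", "Remix", "TypeScript", "Tailwind CSS", "Vite", "Webpack"]),
   ("**Backend:**", ["Node.js", "FastAPI", "Flask", "Django", "Go", "Rust", "Java/Spring", ".NET/C#", "Python", "PHP/Laravel"]),
   ("**Database:**", ["MongoDB", "MySQL", "PostgreSQL", "SQLite", "Redis", "DynamoDB", "Firestore", "Elasticsearch"]),
   ("**DevOps & Deployment:**", ["Docker", "Kubernetes", "AWS", "Google Cloud", "Azure", "Vercel", "Netlify", "Heroku", "GitHub Actions", "Jenkins"]),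
   ("**Testing:**", ["Jest", "Pytest", "Cypress", "Postman"])]

-- _IDX = {t: i for i, (_, ts) in enumerate(_CATS) for t in ts}
def altIdx : PySem.Dict String Int :=
  (PySem.List.enumerate altCats).foldl
    (fun d p => p.2.2.foldl (fun d t => d.insert t p.1) d) PySem.Dict.empty

def altDefault : String := "**Frontend:**\nReact • Next.js • TypeScript • Tailwind CSS\n\n**Backend:**\nNode.js • FastAPI • Python\n\n**Database:**\nPostgreSQL • Redis\n\n**DevOps:**\nDocker • GitHub Actions"

-- loop body: i = _IDX.get(t); if i is not None: buckets[i].append(t)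
def altStep (bk : List String × List String × List String × List String × List String)
    (t : String) : List String × List String × List String × List String × List String :=
  match altIdx.get? t with
  | some 0 => (bk.1 ++ [t], bk.2.1, bk.2.2.1, bk.2.2.2.1, bk.2.2.2.2)
  | some 1 => (bk.1, bk.2.1 ++ [t], bk.2.2.1, bk.2.2.2.1, bk.2.2.2.2)
  | some 2 => (bk.1, bk.2.1, bk.2.2.1 ++ [t], bk.2.2.2.1, bk.2.2.2.2)
  | some 3 => (bk.1, bk.2.1, bk.2.2.1, bk.2.2.2.1 ++ [t], bk.2.2.2.2)
  | some 4 => (bk.1, bk.2.1, bk.2.2.1, bk.2.2.2.1, bk.2.2.2.2 ++ [t])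
  | _ => bk

def infer_tech_stack_py_alt (tech_stack_items : List String) : String :=
  let bk := tech_stack_items.foldl altStep ([], [], [], [], [])
  let parts := ((altCats.zip [bk.1, bk.2.1, bk.2.2.1, bk.2.2.2.1, bk.2.2.2.2]).filter
      (fun x => ¬ x.2.isEmpty)).map (fun x => x.1.1 ++ "\n" ++ PySem.Str.join " • " x.2)
  if parts.isEmpty then altDefault else PySem.Str.join "\n\n" parts

-- ===== PRECONDITION & SPEC =====
def Spec_infer_tech_stack_py (tech_stack_items : List String) (out : String) : Prop := out = infer_tech_stack_py_alt tech_stack_items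
instance (tech_stack_items : List String) (out : String) : Decidable (Spec_infer_tech_stack_py tech_stack_items out) := by unfold Spec_infer_tech_stack_py; infer_instance

-- ===== CLAIM (what is proved, stated in full; the proofs are below) =====
def Claim_equal_infer_tech_stack_py : Prop := ∀ (tech_stack_items : List String), Dom_infer_tech_stack_py tech_stack_items → Spec_infer_tech_stack_py tech_stack_items (infer_tech_stack_py tech_stack_items)

-- ===== LEMMAS AND PROOFS =====

-- left / right whitespace-fixpoint predicates (what ...strip leaves unchanged)
def lNS (cs : List Char) : Prop := List.dropWhile PySem.Chars.isspace cs = cs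
def rNS (cs : List Char) : Prop := lNS cs.reverse

theorem head_not_space {c : Char} {cs : List Char} (h : lNS (c :: cs)) :
    PySem.Chars.isspace c = false := by
  by_cases hc : PySem.Chars.isspace c = true
  · exfalso
    have := congrArg List.length h
    simp [lNS, List.dropWhile_cons, hc] at this
    have := List.length_dropWhile_le PySem.Chars.isspace cs
    omega
  · simpa using hc

theorem lNS_cons {c : Char} {cs : List Char} (hc : PySem.Chars.isspace c = false) :
    lNS (c :: cs) := by
  simp [lNS, List.dropWhile_cons, hc]

theorem lNS_append_list {a : List Char} (b : List Char) (h : lNS a) (ha : a ≠ []) :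
    lNS (a ++ b) := by
  cases a with
  | nil => exact absurd rfl ha
  | cons c cs => exact lNS_cons (head_not_space h)

theorem toList_ne_nil {a : String} (ha : a ≠ "") : a.toList ≠ [] := by
  intro h
  exact ha (String.toList_inj.mp (by simpa using h))

theorem append_ne_left {a : String} (b : String) (ha : a ≠ "") : a ++ b ≠ "" := by
  intro h
  have := congrArg String.toList h
  simp [String.toList_append] at this
  exact ha this.1

theorem lNS_append {a : String} (b : String) (h : lNS a.toList) (ha : a ≠ "") :
    lNS (a ++ b).toList := by
  rw [String.toList_append]
  exact lNS_append_list _ h (toList_ne_nil ha)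

theorem rNS_append (a : String) {b : String} (h : rNS b.toList) (hb : b ≠ "") :
    rNS (a ++ b).toList := by
  unfold rNS at *
  rw [String.toList_append, List.reverse_append]
  exact lNS_append_list _ h (by simpa using toList_ne_nil hb)

theorem dropWhile_ws_nil {w : List Char} (hw : w.all PySem.Chars.isspace = true) :
    List.dropWhile PySem.Chars.isspace w = [] :=
  List.dropWhile_eq_nil_iff.mpr (by simpa [List.all_eq_true] using hw)

theorem strip_append_ws (u w : String) (h1 : lNS u.toList) (h2 : rNS u.toList)
    (hw : w.toList.all PySem.Chars.isspace = true) : PySem.Str.strip (u ++ w) = u := by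
  apply String.toList_inj.mp
  rw [PySem.Str.toList_strip, String.toList_append]
  by_cases hnil : u.toList = []
  · simp [PySem.Chars.strip, PySem.Chars.lstrip, PySem.Chars.rstrip, hnil, dropWhile_ws_nil hw]
  · obtain ⟨c, cs, hu⟩ := List.exists_cons_of_ne_nil hnil
    have hc : PySem.Chars.isspace c = false := head_not_space (hu ▸ h1)
    have hwrev : (w.toList.reverse).all PySem.Chars.isspace = true := by
      simpa [List.all_eq_true] using hw
    have hl : List.dropWhile PySem.Chars.isspace (u.toList ++ w.toList) = u.toList ++ w.toList := by
      rw [hu]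
      exact lNS_cons hc
    have hr : List.dropWhile PySem.Chars.isspace (u.toList ++ w.toList).reverse
        = u.toList.reverse := by
      rw [List.reverse_append, List.dropWhile_append, dropWhile_ws_nil hwrev]
      simp only [List.isEmpty_nil, if_true]
      exact h2
    simp only [PySem.Chars.strip, PySem.Chars.lstrip, PySem.Chars.rstrip]
    rw [hl, hr, List.reverse_reverse]

theorem join_singleton (sep x : String) : PySem.Str.join sep [x] = x := by
  apply String.toList_inj.mp
  simp [PySem.Str.toList_join, PySem.Chars.join, List.intercalate]

theorem join_cons (sep x : String) {xs : List String} (h : xs ≠ []) :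
    PySem.Str.join sep (x :: xs) = x ++ sep ++ PySem.Str.join sep xs := by
  obtain ⟨y, ys, rfl⟩ := List.exists_cons_of_ne_nil h
  apply String.toList_inj.mp
  simp [PySem.Str.toList_join, PySem.Chars.join, String.toList_append,
    List.intercalate, List.intersperse, List.append_assoc]

theorem join_nil (sep : String) : PySem.Str.join sep [] = "" := by
  apply String.toList_inj.mp
  simp [PySem.Str.toList_join, PySem.Chars.join, List.intercalate]

theorem join_bullet_props {f : List String} (hf : f ≠ [])
    (hm : ∀ t ∈ f, rNS t.toList ∧ t ≠ "") :
    rNS (PySem.Str.join " • " f).toList ∧ PySem.Str.join " • " f ≠ "" := by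
  induction f with
  | nil => exact absurd rfl hf
  | cons x rest ih =>
    by_cases hr : rest = []
    · subst hr
      rw [join_singleton]
      exact ⟨(hm x (List.mem_cons_self)).1, (hm x (List.mem_cons_self)).2⟩
    · obtain ⟨ir, ine⟩ := ih hr (fun t ht => hm t (List.mem_cons_of_mem _ ht))
      rw [join_cons _ _ hr]
      exact ⟨rNS_append _ ir ine,
        append_ne_left _ (append_ne_left _ (hm x (List.mem_cons_self)).2)⟩

theorem join_props {parts : List String} (hne : parts ≠ [])
    (hall : ∀ p ∈ parts, lNS p.toList ∧ rNS p.toList ∧ p ≠ "") :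
    lNS (PySem.Str.join "\n\n" parts).toList ∧ rNS (PySem.Str.join "\n\n" parts).toList ∧
      PySem.Str.join "\n\n" parts ≠ "" := by
  induction parts with
  | nil => exact absurd rfl hne
  | cons p rest ih =>
    obtain ⟨pl, pr, pne⟩ := hall p (List.mem_cons_self)
    by_cases hr : rest = []
    · subst hr
      rw [join_singleton]
      exact ⟨pl, pr, pne⟩
    · obtain ⟨il, ir, ine⟩ := ih hr (fun t ht => hall t (List.mem_cons_of_mem _ ht))
      rw [join_cons _ _ hr]
      exact ⟨lNS_append _ (lNS_append _ pl pne) (append_ne_left _ pne),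
        rNS_append _ ir ine, append_ne_left _ (append_ne_left _ pne)⟩

-- the index dict is the concatenation of the per-category key→index tables
theorem get?_mapConst (xs : List String) (i : Int) (rest : List (String × Int)) (t : String) :
    (PySem.Dict.mk (xs.map (fun s => (s, i)) ++ rest)).get? t =
      (if xs.contains t then some i else (PySem.Dict.mk rest).get? t) := by
  induction xs with
  | nil => simp
  | cons a xs ih =>
    by_cases h : a = t
    · simp [PySem.Dict.get?_mk_cons, List.contains_cons, h]
    · have hb' : (a == t) = false := by simp; exact h
      have h2 : ¬ t = a := fun e => h e.symm
      simp [PySem.Dict.get?_mk_cons, hb', ih, h2]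

set_option maxRecDepth 10000 in
theorem altIdx_eq : altIdx =
    PySem.Dict.mk (catsF.map (fun s => (s, (0:Int))) ++ (catsB.map (fun s => (s, 1)) ++
      (catsD.map (fun s => (s, 2)) ++ (catsO.map (fun s => (s, 3)) ++
        (catsT.map (fun s => (s, 4)) ++ []))))) := by
  decide

theorem altIdx_get (t : String) : altIdx.get? t =
    (if catsF.contains t then some (0:Int) else if catsB.contains t then some 1 else
     if catsD.contains t then some 2 else if catsO.contains t then some 3 else
     if catsT.contains t then some 4 else none) := by
  rw [altIdx_eq, get?_mapConst, get?_mapConst, get?_mapConst, get?_mapConst, get?_mapConst]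
  rfl

theorem altStep0 {t : String} (hg : altIdx.get? t = some 0)
    (bk : List String × List String × List String × List String × List String) :
    altStep bk t = (bk.1 ++ [t], bk.2.1, bk.2.2.1, bk.2.2.2.1, bk.2.2.2.2) := by
  unfold altStep; rw [hg]; rfl

theorem altStep1 {t : String} (hg : altIdx.get? t = some 1)
    (bk : List String × List String × List String × List String × List String) :
    altStep bk t = (bk.1, bk.2.1 ++ [t], bk.2.2.1, bk.2.2.2.1, bk.2.2.2.2) := by
  unfold altStep; rw [hg]; rfl

theorem altStep2 {t : String} (hg : altIdx.get? t = some 2)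
    (bk : List String × List String × List String × List String × List String) :
    altStep bk t = (bk.1, bk.2.1, bk.2.2.1 ++ [t], bk.2.2.2.1, bk.2.2.2.2) := by
  unfold altStep; rw [hg]; rfl

theorem altStep3 {t : String} (hg : altIdx.get? t = some 3)
    (bk : List String × List String × List String × List String × List String) :
    altStep bk t = (bk.1, bk.2.1, bk.2.2.1, bk.2.2.2.1 ++ [t], bk.2.2.2.2) := by
  unfold altStep; rw [hg]; rfl

theorem altStep4 {t : String} (hg : altIdx.get? t = some 4)
    (bk : List String × List String × List String × List String × List String) :
    altStep bk t = (bk.1, bk.2.1, bk.2.2.1, bk.2.2.2.1, bk.2.2.2.2 ++ [t]) := by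
  unfold altStep; rw [hg]; rfl

theorem altStepN {t : String} (hg : altIdx.get? t = none)
    (bk : List String × List String × List String × List String × List String) :
    altStep bk t = bk := by
  unfold altStep; rw [hg]

set_option maxRecDepth 10000 in
theorem fold_inv (l : List String) : ∀ a0 a1 a2 a3 a4 : List String,
    l.foldl altStep (a0, a1, a2, a3, a4) =
      (a0 ++ l.filter (fun t => catsF.contains t), a1 ++ l.filter (fun t => catsB.contains t),
       a2 ++ l.filter (fun t => catsD.contains t), a3 ++ l.filter (fun t => catsO.contains t),
       a4 ++ l.filter (fun t => catsT.contains t)) := by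
  have dFB : ∀ a ∈ catsF, a ∉ catsB := by decide
  have dFD : ∀ a ∈ catsF, a ∉ catsD := by decide
  have dFO : ∀ a ∈ catsF, a ∉ catsO := by decide
  have dFT : ∀ a ∈ catsF, a ∉ catsT := by decide
  have dBD : ∀ a ∈ catsB, a ∉ catsD := by decide
  have dBO : ∀ a ∈ catsB, a ∉ catsO := by decide
  have dBT : ∀ a ∈ catsB, a ∉ catsT := by decide
  have dDO : ∀ a ∈ catsD, a ∉ catsO := by decide
  have dDT : ∀ a ∈ catsD, a ∉ catsT := by decide
  have dOT : ∀ a ∈ catsO, a ∉ catsT := by decide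
  induction l with
  | nil => simp
  | cons t l ih =>
    intro a0 a1 a2 a3 a4
    simp only [List.foldl_cons, List.filter_cons]
    by_cases m0 : t ∈ catsF
    · have m1 : t ∉ catsB := dFB t m0
      have m2 : t ∉ catsD := dFD t m0
      have m3 : t ∉ catsO := dFO t m0
      have m4 : t ∉ catsT := dFT t m0
      have hg : altIdx.get? t = some 0 := by rw [altIdx_get]; simp [m0]
      rw [altStep0 hg]
      simp [m0, m1, m2, m3, m4, ih, List.append_assoc]
    · by_cases m1 : t ∈ catsB
      · have m2 : t ∉ catsD := dBD t m1
        have m3 : t ∉ catsO := dBO t m1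
        have m4 : t ∉ catsT := dBT t m1
        have hg : altIdx.get? t = some 1 := by rw [altIdx_get]; simp [m0, m1]
        rw [altStep1 hg]
        simp [m0, m1, m2, m3, m4, ih, List.append_assoc]
      · by_cases m2 : t ∈ catsD
        · have m3 : t ∉ catsO := dDO t m2
          have m4 : t ∉ catsT := dDT t m2
          have hg : altIdx.get? t = some 2 := by rw [altIdx_get]; simp [m0, m1, m2]
          rw [altStep2 hg]
          simp [m0, m1, m2, m3, m4, ih, List.append_assoc]
        · by_cases m3 : t ∈ catsO
          · have m4 : t ∉ catsT := dOT t m3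
            have hg : altIdx.get? t = some 3 := by rw [altIdx_get]; simp [m0, m1, m2, m3]
            rw [altStep3 hg]
            simp [m0, m1, m2, m3, m4, ih, List.append_assoc]
          · by_cases m4 : t ∈ catsT
            · have hg : altIdx.get? t = some 4 := by rw [altIdx_get]; simp [m0, m1, m2, m3, m4]
              rw [altStep4 hg]
              simp [m0, m1, m2, m3, m4, ih, List.append_assoc]
            · have hg : altIdx.get? t = none := by rw [altIdx_get]; simp [m0, m1, m2, m3, m4]
              rw [altStepN hg]
              simp [m0, m1, m2, m3, m4, ih]

-- blocks: (header, bucket, trailing separator)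
def blockOf (b : String × List String × String) : String :=
  if b.2.1.isEmpty then "" else b.1 ++ "\n" ++ PySem.Str.join " • " b.2.1 ++ b.2.2

def concatB : List (String × List String × String) → String
  | [] => ""
  | b :: bs => blockOf b ++ concatB bs

def partsOf (bs : List (String × List String × String)) : List String :=
  (bs.filter (fun b => ¬ b.2.1.isEmpty)).map (fun b => b.1 ++ "\n" ++ PySem.Str.join " • " b.2.1)

theorem concat_eq (bs : List (String × List String × String))
    (hsep : ∀ b ∈ bs.dropLast, b.2.2 = "\n\n")
    (hws : ∀ b ∈ bs, b.2.2.toList.all PySem.Chars.isspace = true) :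
    ∃ w : String, w.toList.all PySem.Chars.isspace = true ∧
      concatB bs = PySem.Str.join "\n\n" (partsOf bs) ++ w ∧
      (partsOf bs = [] → concatB bs = "") := by
  induction bs with
  | nil =>
    exact ⟨"", by decide, by simp [concatB, partsOf, join_nil], fun _ => rfl⟩
  | cons b bs ih =>
    have hsub : ∀ x ∈ bs.dropLast, x ∈ (b :: bs).dropLast := by
      intro x hx
      cases bs with
      | nil => simp at hx
      | cons c cs => exact List.mem_cons_of_mem _ hx
    obtain ⟨w, hwall, heq, hemp⟩ :=
      ih (fun x hx => hsep x (hsub x hx)) (fun x hx => hws x (List.mem_cons_of_mem _ hx))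
    by_cases hb : b.2.1 = []
    · refine ⟨w, hwall, ?_, ?_⟩
      · simpa [concatB, blockOf, hb, partsOf, List.filter_cons] using heq
      · intro hp
        have hp' : partsOf bs = [] := by simpa [partsOf, List.filter_cons, hb] using hp
        simp [concatB, blockOf, hb, hemp hp']
    · have hparts : partsOf (b :: bs) =
          (b.1 ++ "\n" ++ PySem.Str.join " • " b.2.1) :: partsOf bs := by
        simp [partsOf, List.filter_cons, hb]
      by_cases hp : partsOf bs = []
      · refine ⟨b.2.2, hws b List.mem_cons_self, ?_, ?_⟩
        · rw [hparts, hp, join_singleton]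
          simp [concatB, blockOf, hb, hemp hp, String.append_assoc]
        · intro hc
          rw [hparts] at hc
          exact absurd hc (List.cons_ne_nil _ _)
      · have hbs : bs ≠ [] := by
          intro e; subst e; exact hp rfl
        have hsepb : b.2.2 = "\n\n" := by
          apply hsep
          cases bs with
          | nil => exact absurd rfl hbs
          | cons c cs => exact List.mem_cons_self
        refine ⟨w, hwall, ?_, ?_⟩
        · rw [hparts, join_cons _ _ hp]
          simp [concatB, blockOf, hb, heq, hsepb, String.append_assoc]
        · intro hc
          rw [hparts] at hc
          exact absurd hc (List.cons_ne_nil _ _)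

theorem parts_props (bs : List (String × List String × String))
    (hmem : ∀ b ∈ bs, ∀ t ∈ b.2.1, rNS t.toList ∧ t ≠ "")
    (hhdr : ∀ b ∈ bs, lNS b.1.toList ∧ b.1 ≠ "") :
    ∀ p ∈ partsOf bs, lNS p.toList ∧ rNS p.toList ∧ p ≠ "" := by
  intro p hp
  obtain ⟨b, hbf, rfl⟩ := List.mem_map.mp hp
  have hbm : b ∈ bs := List.mem_of_mem_filter hbf
  have hbne : b.2.1 ≠ [] := by
    have := List.of_mem_filter hbf
    simpa [List.isEmpty_iff] using this
  obtain ⟨hl, hhne⟩ := hhdr b hbm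
  obtain ⟨jr, jne⟩ := join_bullet_props hbne (hmem b hbm)
  exact ⟨lNS_append _ (lNS_append _ hl hhne) (append_ne_left _ hhne),
    rNS_append _ jr jne, append_ne_left _ (append_ne_left _ hhne)⟩

theorem if_appA (c : Prop) [Decidable c] (s h j sep : String) :
    (if c then s ++ h ++ j ++ sep else s) = s ++ (if c then h ++ (j ++ sep) else "") := by
  split <;> simp [String.append_assoc]

-- the five blocks A assembles, as data
def blocksOf (items : List String) : List (String × List String × String) :=
  [("**Frontend:**", items.filter (fun t => catsF.contains t), "\n\n"),
   ("**Backend:**", items.filter (fun t => catsB.contains t), "\n\n"),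
   ("**Database:**", items.filter (fun t => catsD.contains t), "\n\n"),
   ("**DevOps & Deployment:**", items.filter (fun t => catsO.contains t), "\n\n"),
   ("**Testing:**", items.filter (fun t => catsT.contains t), "\n")]

theorem A_eq (items : List String) : infer_tech_stack_py items =
    PySem.Str.strip (if concatB (blocksOf items) = "" then defaultBlock
      else concatB (blocksOf items)) := by
  simp only [infer_tech_stack_py, if_appA]
  simp only [blocksOf, concatB, blockOf,
    show ("**Frontend:**\n" : String) = "**Frontend:**" ++ "\n" from rfl,
    show ("**Backend:**\n" : String) = "**Backend:**" ++ "\n" from rfl,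
    show ("**Database:**\n" : String) = "**Database:**" ++ "\n" from rfl,
    show ("**DevOps & Deployment:**\n" : String) = "**DevOps & Deployment:**" ++ "\n" from rfl,
    show ("**Testing:**\n" : String) = "**Testing:**" ++ "\n" from rfl,
    String.append_assoc, ite_not, String.append_empty, String.empty_append]

theorem B_eq (items : List String) : infer_tech_stack_py_alt items =
    (if (partsOf (blocksOf items)).isEmpty then altDefault
      else PySem.Str.join "\n\n" (partsOf (blocksOf items))) := by
  simp only [infer_tech_stack_py_alt]
  rw [fold_inv items [] [] [] [] []]
  simp only [List.nil_append, altCats, partsOf, blocksOf, List.zip_cons_cons,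
    List.zip_nil_right, List.filter_cons, List.filter_nil, apply_ite (List.map _),
    List.map_cons, List.map_nil]

set_option maxRecDepth 40000 in
theorem emit_eq (bs : List (String × List String × String))
    (hsep : ∀ b ∈ bs.dropLast, b.2.2 = "\n\n")
    (hws : ∀ b ∈ bs, b.2.2.toList.all PySem.Chars.isspace = true)
    (hmem : ∀ b ∈ bs, ∀ t ∈ b.2.1, rNS t.toList ∧ t ≠ "")
    (hhdr : ∀ b ∈ bs, lNS b.1.toList ∧ b.1 ≠ "") :
    PySem.Str.strip (if concatB bs = "" then defaultBlock else concatB bs) =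
      (if (partsOf bs).isEmpty then altDefault
        else PySem.Str.join "\n\n" (partsOf bs)) := by
  obtain ⟨w, hwall, heq, hemp⟩ := concat_eq bs hsep hws
  by_cases hp : partsOf bs = []
  · rw [if_pos (hemp hp), if_pos (by simp [hp])]
    decide
  · obtain ⟨jl, jr, jne⟩ := join_props hp (parts_props bs hmem hhdr)
    have hcne : concatB bs ≠ "" := by
      rw [heq]; exact append_ne_left _ jne
    rw [if_neg hcne, heq, strip_append_ws _ _ jl jr hwall,
      if_neg (by simpa [List.isEmpty_iff] using hp)]

-- ===== VERDICT (by name: the statement is the Claim_ definition above) =====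
theorem infer_tech_stack_py_spec : Claim_equal_infer_tech_stack_py := by
  intro items _
  unfold Spec_infer_tech_stack_py
  rw [A_eq items, B_eq items]
  apply emit_eq
  · intro b hb
    simp [blocksOf, List.dropLast] at hb
    rcases hb with rfl | rfl | rfl | rfl <;> rfl
  · have nl2 : ("\n\n" : String).toList.all PySem.Chars.isspace = true := by decide
    have nl1 : ("\n" : String).toList.all PySem.Chars.isspace = true := by decide
    intro b hb
    simp [blocksOf] at hb
    rcases hb with rfl | rfl | rfl | rfl | rfl <;> first | exact nl2 | exact nl1
  · have okF : ∀ t ∈ catsF, rNS t.toList ∧ t ≠ "" := by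
      intro t ht; fin_cases ht <;> exact ⟨rfl, by decide⟩
    have okB : ∀ t ∈ catsB, rNS t.toList ∧ t ≠ "" := by
      intro t ht; fin_cases ht <;> exact ⟨rfl, by decide⟩
    have okD : ∀ t ∈ catsD, rNS t.toList ∧ t ≠ "" := by
      intro t ht; fin_cases ht <;> exact ⟨rfl, by decide⟩
    have okO : ∀ t ∈ catsO, rNS t.toList ∧ t ≠ "" := by
      intro t ht; fin_cases ht <;> exact ⟨rfl, by decide⟩
    have okT : ∀ t ∈ catsT, rNS t.toList ∧ t ≠ "" := by
      intro t ht; fin_cases ht <;> exact ⟨rfl, by decide⟩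
    intro b hb
    simp [blocksOf] at hb
    rcases hb with rfl | rfl | rfl | rfl | rfl <;> intro t ht <;>
      first
      | exact okF t (by simpa using List.of_mem_filter ht)
      | exact okB t (by simpa using List.of_mem_filter ht)
      | exact okD t (by simpa using List.of_mem_filter ht)
      | exact okO t (by simpa using List.of_mem_filter ht)
      | exact okT t (by simpa using List.of_mem_filter ht)
  · have hF : lNS ("**Frontend:**" : String).toList ∧ ("**Frontend:**" : String) ≠ "" :=
      ⟨rfl, by decide⟩
    have hB : lNS ("**Backend:**" : String).toList ∧ ("**Backend:**" : String) ≠ "" :=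
      ⟨rfl, by decide⟩
    have hD : lNS ("**Database:**" : String).toList ∧ ("**Database:**" : String) ≠ "" :=
      ⟨rfl, by decide⟩
    have hO : lNS ("**DevOps & Deployment:**" : String).toList ∧
        ("**DevOps & Deployment:**" : String) ≠ "" := ⟨rfl, by decide⟩
    have hT : lNS ("**Testing:**" : String).toList ∧ ("**Testing:**" : String) ≠ "" :=
      ⟨rfl, by decide⟩
    intro b hb
    simp [blocksOf] at hb
    rcases hb with rfl | rfl | rfl | rfl | rfl <;>
      first | exact hF | exact hB | exact hD | exact hO | exact hT
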